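-- pv_equiv track=rewrite | github.com/myrice12/TheoryAgent | theoryagent/latex/fixer.py | _escape_unescaped_underscores_outside_math
-- ===== SOURCE A (Python) =====
-- def _escape_unescaped_underscores_outside_math(text: str) -> str:
--     """Escape bare underscores while leaving math-mode content unchanged."""
--     result: list[str] = []
--     in_math = False
--     escaped = False
--
--     for ch in text:
--         if escaped:
--             result.append(ch)
--             escaped = False
--             continue
--         if ch == "\\":
--             result.append(ch)
--             escaped = True
--             continue
--         if ch == "$":
--             in_math = not in_math
--             result.append(ch)
--             continue
--         if ch == "_" and not in_math:
--             result.append(r"\_")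
--             continue
--         result.append(ch)
--
--     return "".join(result)
-- ===== SOURCE B (Python) =====
-- def _escape_unescaped_underscores_outside_math(text: str) -> str:
--     # Phase 1: lexical pass — split the text into tokens, where a backslash
--     # together with the character it escapes forms one verbatim token.
--     tokens = []
--     i = 0
--     while i < len(text):
--         tokens.append(text[i:i + 2] if text[i] == "\\" else text[i])
--         i += len(tokens[-1])
--     # Phase 2: rewrite bare underscores, toggling math mode at '$' tokens.
--     out = []
--     in_math = False
--     for tok in tokens:
--         if tok == "$":
--             in_math = not in_math
--         out.append(r"\_" if tok == "_" and not in_math else tok)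
--     return "".join(out)
-- ===== Notes on version B (the rewrite author's own statement) =====
-- stated objective: alternative
-- what changed: Replaced the single-pass character state machine with an escaped-flag by a two-phase design: a lexer that groups each backslash with the character it escapes into one verbatim token, then a token-level rewrite pass that toggles math mode at dollar-sign tokens and escapes bare underscores.
import Mathlib
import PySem

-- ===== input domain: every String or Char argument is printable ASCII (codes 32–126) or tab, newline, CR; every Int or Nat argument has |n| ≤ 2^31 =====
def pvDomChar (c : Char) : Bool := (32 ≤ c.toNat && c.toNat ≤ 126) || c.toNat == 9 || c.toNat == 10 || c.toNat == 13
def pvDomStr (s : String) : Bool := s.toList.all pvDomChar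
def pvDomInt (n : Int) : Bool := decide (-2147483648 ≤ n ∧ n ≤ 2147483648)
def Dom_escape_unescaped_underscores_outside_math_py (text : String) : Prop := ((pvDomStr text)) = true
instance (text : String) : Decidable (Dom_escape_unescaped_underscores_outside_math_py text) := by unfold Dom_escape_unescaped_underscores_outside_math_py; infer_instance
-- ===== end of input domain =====

-- B replaces A's one-pass character state machine (with an 'escaped' flag) by a two-phase
-- design: a lexer grouping each backslash with its escaped character into one token, then a
-- token-level rewrite pass; same output, same cost (objective: alternative).

-- ===== PORT A =====
-- A's per-character loop: state = (in_math, escaped, result list of strings), joined at the end.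
def pvGoA : List Char → Bool → Bool → List String → List String
  | [], _, _, acc => acc
  | c :: rest, inm, esc, acc =>
    if esc then pvGoA rest inm false (acc ++ [c.toString])
    else if c = '\\' then pvGoA rest inm true (acc ++ [c.toString])
    else if c = '$' then pvGoA rest (!inm) esc (acc ++ [c.toString])
    else if c = '_' ∧ inm = false then pvGoA rest inm esc (acc ++ ["\\_"])
    else pvGoA rest inm esc (acc ++ [c.toString])

def escape_unescaped_underscores_outside_math_py (text : String) : String :=
  String.join (pvGoA text.toList false false [])

-- ===== PORT B =====
-- Phase 1 of Source B: lex into tokens; a backslash takes the following character with it (text[i:i+2]).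
def pvTokB : List Char → List String
  | [] => []
  | c :: rest =>
    if c = '\\' then
      match rest with
      | [] => [c.toString]
      | d :: rest' => (c.toString ++ d.toString) :: pvTokB rest'
    else c.toString :: pvTokB rest

-- Phase 2 of Source B: rewrite tokens, toggling in_math at a dollar-sign token, escaping bare underscores.
def pvRewB : List String → Bool → List String
  | [], _ => []
  | t :: ts, inm =>
    if t = "$" then t :: pvRewB ts (!inm)
    else (if t = "_" ∧ inm = false then "\\_" else t) :: pvRewB ts inm

def escape_unescaped_underscores_outside_math_py_alt (text : String) : String :=
  String.join (pvRewB (pvTokB text.toList) false)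

-- ===== PRECONDITION & SPEC =====
def Spec_escape_unescaped_underscores_outside_math_py (text : String) (out : String) : Prop := out = escape_unescaped_underscores_outside_math_py_alt text
instance (text : String) (out : String) : Decidable (Spec_escape_unescaped_underscores_outside_math_py text out) := by unfold Spec_escape_unescaped_underscores_outside_math_py; infer_instance

-- ===== CLAIM (what is proved, stated in full; the proofs are below) =====
def Claim_equal_escape_unescaped_underscores_outside_math_py : Prop := ∀ (text : String), Dom_escape_unescaped_underscores_outside_math_py text → Spec_escape_unescaped_underscores_outside_math_py text (escape_unescaped_underscores_outside_math_py text)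

-- ===== LEMMAS AND PROOFS =====

theorem pv_join_aux (l : List String) (a : String) :
    l.foldl (fun r s => r ++ s) a = a ++ String.join l := by
  induction l generalizing a with
  | nil => simp [String.join]
  | cons s ts ih =>
    simp only [String.join, List.foldl]
    rw [ih, ih]
    simp [String.append_assoc]

theorem pv_join_cons (s : String) (l : List String) :
    String.join (s :: l) = s ++ String.join l := by
  have h : String.join (s :: l) = l.foldl (fun r t => r ++ t) ("" ++ s) := rfl
  rw [h, pv_join_aux]
  simp

theorem pv_join_snoc (l : List String) (s : String) :
    String.join (l ++ [s]) = String.join l ++ s := by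
  have h1 : String.join (l ++ [s]) = (l ++ [s]).foldl (fun r t => r ++ t) "" := rfl
  have h2 : String.join l = l.foldl (fun r t => r ++ t) "" := rfl
  rw [h1, h2, List.foldl_append]
  rfl

theorem pv_char_toString_eq_iff (c d : Char) : c.toString = d.toString ↔ c = d := by
  constructor
  · intro h
    have := congrArg String.toList h
    simpa [Char.toString] using this
  · intro h; rw [h]

theorem pv_two_ne_one (c d e : Char) : c.toString ++ d.toString ≠ e.toString := by
  intro h
  have := congrArg String.toList h
  simp [Char.toString] at this

theorem pv_key (l : List Char) (inm : Bool) (acc : List String) :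
    String.join (pvGoA l inm false acc)
      = String.join acc ++ String.join (pvRewB (pvTokB l) inm) := by
  match l with
  | [] => simp [pvGoA, pvTokB, pvRewB, String.join]
  | c :: rest =>
    by_cases hc : c = '\\'
    · subst hc
      match rest with
      | [] =>
        have hA : pvGoA ['\\'] inm false acc = acc ++ ['\\'.toString] := rfl
        have hB : pvRewB (pvTokB ['\\']) inm = ['\\'.toString] := by
          have hT : pvTokB ['\\'] = ['\\'.toString] := rfl
          rw [hT]
          simp only [pvRewB]
          rw [if_neg (by decide), if_neg (by intro h; exact (by decide : ¬'\\'.toString = "_") h.1)]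
        rw [hA, hB, pv_join_snoc, pv_join_cons,
          show String.join ([] : List String) = "" from rfl]
        simp
      | d :: rest' =>
        have hA : pvGoA ('\\' :: d :: rest') inm false acc
            = pvGoA rest' inm false ((acc ++ ['\\'.toString]) ++ [d.toString]) := rfl
        have hT : pvTokB ('\\' :: d :: rest')
            = ('\\'.toString ++ d.toString) :: pvTokB rest' := rfl
        have hne : ¬ ('\\'.toString ++ d.toString) = "$" := pv_two_ne_one '\\' d '$'
        have hne3 : ¬ (('\\'.toString ++ d.toString) = "_" ∧ inm = false) := by
          intro h; exact pv_two_ne_one '\\' d '_' h.1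
        have hR : pvRewB (('\\'.toString ++ d.toString) :: pvTokB rest') inm
            = ('\\'.toString ++ d.toString) :: pvRewB (pvTokB rest') inm := by
          simp only [pvRewB]
          rw [if_neg hne, if_neg hne3]
        rw [hA, pv_key rest' inm, hT, hR, pv_join_snoc, pv_join_snoc, pv_join_cons]
        simp only [String.append_assoc]
    · by_cases hd : c = '$'
      · subst hd
        have hA : pvGoA ('$' :: rest) inm false acc
            = pvGoA rest (!inm) false (acc ++ ['$'.toString]) := rfl
        have hT : pvTokB ('$' :: rest) = '$'.toString :: pvTokB rest := by
          rw [pvTokB.eq_def]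
          simp
        have hB : pvRewB ('$'.toString :: pvTokB rest) inm
            = '$'.toString :: pvRewB (pvTokB rest) (!inm) := by
          simp only [pvRewB]
          rw [if_pos (by decide)]
        rw [hA, pv_key rest (!inm), hT, hB, pv_join_snoc, pv_join_cons]
        simp only [String.append_assoc]
      · by_cases hu : c = '_' ∧ inm = false
        · obtain ⟨hu1, hu2⟩ := hu
          subst hu1; subst hu2
          have hA : pvGoA ('_' :: rest) false false acc
              = pvGoA rest false false (acc ++ ["\\_"]) := rfl
          have hT : pvTokB ('_' :: rest) = '_'.toString :: pvTokB rest := by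
            rw [pvTokB.eq_def]
            simp
          have hB : pvRewB ('_'.toString :: pvTokB rest) false
              = "\\_" :: pvRewB (pvTokB rest) false := by
            simp only [pvRewB]
            rw [if_neg (by decide), if_pos (by decide)]
          rw [hA, pv_key rest false, hT, hB, pv_join_snoc, pv_join_cons]
          simp only [String.append_assoc]
        · have hA : pvGoA (c :: rest) inm false acc
              = pvGoA rest inm false (acc ++ [c.toString]) := by
            simp [pvGoA, hc, hd, hu]
          have hT : pvTokB (c :: rest) = c.toString :: pvTokB rest := by
            rw [pvTokB.eq_def]
            simp [hc]
          have htok : ¬ c.toString = "$" := by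
            intro h; exact hd ((pv_char_toString_eq_iff c '$').mp h)
          have htok2 : ¬ (c.toString = "_" ∧ inm = false) := by
            intro h; exact hu ⟨(pv_char_toString_eq_iff c '_').mp h.1, h.2⟩
          have hR : pvRewB (c.toString :: pvTokB rest) inm
              = c.toString :: pvRewB (pvTokB rest) inm := by
            simp only [pvRewB]
            rw [if_neg htok, if_neg htok2]
          rw [hA, pv_key rest inm, hT, hR, pv_join_snoc, pv_join_cons]
          simp only [String.append_assoc]
termination_by l.length
decreasing_by all_goals simp only [List.length_cons]; omega

-- ===== VERDICT (by name: the statement is the Claim_ definition above) =====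
theorem escape_unescaped_underscores_outside_math_py_spec : Claim_equal_escape_unescaped_underscores_outside_math_py := by
  intro text _
  unfold Spec_escape_unescaped_underscores_outside_math_py
  unfold escape_unescaped_underscores_outside_math_py escape_unescaped_underscores_outside_math_py_alt
  rw [pv_key, show String.join ([] : List String) = "" from rfl]
  simp
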